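-- pv_equiv track=rewrite | github.com/viing937/codeforces | src/1194C.py | check
-- ===== SOURCE A (Python) =====
-- from collections import Counter
--
-- def check(s, t, p):
--     p = Counter(p)
--     idx = 0
--     for ch in t:
--         if idx < len(s) and s[idx] == ch:
--             idx += 1
--         elif ch in p and p[ch] > 0:
--             p[ch] -= 1
--         else:
--             return False
--     return idx == len(s)
-- ===== SOURCE B (Python) =====
-- def check(s, t, p):
--     # Phase 1: plain subsequence test (greedy two-pointer), pool ignored.
--     i = 0
--     for ch in t:
--         if i < len(s) and ch == s[i]:
--             i += 1
--     if i < len(s):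
--         return False
--     # Phase 2: leftover characters of t (those beyond s's counts) must be covered by p.
--     return all(t.count(ch) <= s.count(ch) + p.count(ch) for ch in set(t))
-- ===== Notes on version B (the rewrite author's own statement) =====
-- stated objective: simpler
-- what changed: Replaces the interleaved greedy-plus-mutable-pool pass (decrementing a Counter as it scans t) by two independent phases: a plain two-pointer subsequence test of s in t, then a per-character count comparison t.count(c) <= s.count(c) + p.count(c) over the distinct characters of t.
import Mathlib
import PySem

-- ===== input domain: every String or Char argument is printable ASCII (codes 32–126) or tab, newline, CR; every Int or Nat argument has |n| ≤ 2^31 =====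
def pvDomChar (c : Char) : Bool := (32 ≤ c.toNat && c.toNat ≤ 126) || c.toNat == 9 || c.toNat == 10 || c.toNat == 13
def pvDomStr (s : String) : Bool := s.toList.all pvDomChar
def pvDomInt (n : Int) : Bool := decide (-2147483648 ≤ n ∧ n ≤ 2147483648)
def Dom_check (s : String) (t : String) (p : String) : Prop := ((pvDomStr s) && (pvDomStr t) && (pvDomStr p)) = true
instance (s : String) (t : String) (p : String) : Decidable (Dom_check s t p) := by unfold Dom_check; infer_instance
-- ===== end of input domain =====

-- B replaces A's single interleaved pass (greedy match against s while decrementing a Counter pool)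
-- by a plain subsequence test followed by a per-character count comparison; objective: simpler.

-- ===== PORT A =====

def checkLoopA (s : List Char) : List Char → Nat → PySem.Dict Char Int → Bool
  | [], idx, _ => idx == s.length
  | ch :: rest, idx, pd =>
    if idx < s.length ∧ s[idx]? = some ch then
      checkLoopA s rest (idx + 1) pd
    else if pd.contains ch ∧ pd.getD ch 0 > 0 then
      checkLoopA s rest idx (pd.insert ch (pd.getD ch 0 - 1))
    else
      false

def check (s : String) (t : String) (p : String) : Bool :=
  checkLoopA s.toList t.toList 0 (PySem.Dict.counter p.toList)

-- ===== PORT B =====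
def subIdx (s : List Char) : List Char → Nat → Nat
  | [], i => i
  | ch :: rest, i => subIdx s rest (if i < s.length ∧ s[i]? = some ch then i + 1 else i)

def check_alt (s : String) (t : String) (p : String) : Bool :=
  if subIdx s.toList t.toList 0 < s.toList.length then
    false
  else
    (PySem.Set.ofList t.toList).all
      (fun ch => decide (t.toList.count ch ≤ s.toList.count ch + p.toList.count ch))


-- ===== PRECONDITION & SPEC =====
def Spec_check (s : String) (t : String) (p : String) (out : Bool) : Prop := out = check_alt s t p
instance (s : String) (t : String) (p : String) (out : Bool) : Decidable (Spec_check s t p out) := by unfold Spec_check; infer_instance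

-- ===== CLAIM (what is proved, stated in full; the proofs are below) =====
def Claim_equal_check : Prop := ∀ (s : String) (t : String) (p : String), Dom_check s t p → Spec_check s t p (check s t p)

-- ===== LEMMAS AND PROOFS =====
-- helper: the chars of t not matched by the greedy pointer
def gUnm (s : List Char) : List Char → Nat → List Char
  | [], _ => []
  | ch :: rest, i =>
    if i < s.length ∧ s[i]? = some ch then gUnm s rest (i + 1)
    else ch :: gUnm s rest i

theorem subIdx_le (s : List Char) : ∀ (t : List Char) (i : Nat), i ≤ s.length →
    subIdx s t i ≤ s.length := by
  intro t
  induction t with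
  | nil => intro i h; simpa [subIdx] using h
  | cons ch rest ih =>
    intro i h
    simp only [subIdx]
    split
    · exact ih _ (by omega)
    · exact ih _ h

theorem all_shift (ch : Char) (U : List Char) (pd : PySem.Dict Char Int)
    (hpos : 0 < pd.getD ch 0) :
    (U.all (fun c => decide ((U.count c : Int) ≤ (pd.insert ch (pd.getD ch 0 - 1)).getD c 0))) =
    ((ch :: U).all (fun c => decide (((ch :: U).count c : Int) ≤ pd.getD c 0))) := by
  rw [Bool.eq_iff_iff]
  simp only [List.all_eq_true, decide_eq_true_eq, List.mem_cons,
    PySem.Dict.getD_insert, List.count_cons, beq_iff_eq]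
  constructor
  · intro h x hx
    by_cases hxe : x = ch
    · subst hxe
      rw [if_pos rfl]
      by_cases hmem : x ∈ U
      · have hh := h x hmem
        rw [if_pos rfl] at hh
        push_cast
        omega
      · rw [List.count_eq_zero_of_not_mem hmem]
        push_cast
        omega
    · rcases hx with hx | hx
      · exact absurd hx hxe
      · have hh := h x hx
        rw [if_neg hxe] at hh
        rw [if_neg (fun hq : ch = x => hxe hq.symm)]
        push_cast
        omega
  · intro h x hx
    by_cases hxe : x = ch
    · subst hxe
      have hh := h x (Or.inl rfl)
      rw [if_pos rfl] at hh
      rw [if_pos rfl]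
      push_cast at hh
      omega
    · have hh := h x (Or.inr hx)
      rw [if_neg (fun hq : ch = x => hxe hq.symm)] at hh
      rw [if_neg hxe]
      push_cast at hh
      omega

theorem loopA_eq (s : List Char) : ∀ (t : List Char) (idx : Nat) (pd : PySem.Dict Char Int),
    checkLoopA s t idx pd =
      ((subIdx s t idx == s.length) &&
        (gUnm s t idx).all (fun c => decide (((gUnm s t idx).count c : Int) ≤ pd.getD c 0))) := by
  intro t
  induction t with
  | nil => intro idx pd; simp [checkLoopA, subIdx, gUnm]
  | cons ch rest ih =>
    intro idx pd
    simp only [checkLoopA, subIdx, gUnm]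
    split
    · rw [ih]
    · rename_i hm
      by_cases hpos : pd.getD ch 0 > 0
      · have hcont : pd.contains ch = true := by
          cases hh : pd.contains ch
          · have hz : pd.getD ch 0 = 0 := PySem.Dict.getD_of_not_contains pd 0 hh
            omega
          · rfl
        rw [if_pos ⟨hcont, hpos⟩, ih, all_shift ch (gUnm s rest idx) pd hpos]
      · have hcond : ¬ (pd.contains ch = true ∧ pd.getD ch 0 > 0) := by
          intro hq
          exact hpos hq.2
        rw [if_neg hcond]
        have hfalse : ((ch :: gUnm s rest idx).all
            (fun c => decide (((ch :: gUnm s rest idx).count c : Int) ≤ pd.getD c 0))) = false := by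
          rw [Bool.eq_false_iff]
          intro hall
          rw [List.all_eq_true] at hall
          have hch := hall ch (List.mem_cons_self ..)
          simp only [decide_eq_true_eq, List.count_cons, beq_iff_eq] at hch
          push_cast at hch
          omega
        rw [hfalse, Bool.and_false]

theorem count_split (s : List Char) : ∀ (t : List Char) (idx : Nat),
    subIdx s t idx = s.length →
    ∀ c : Char, t.count c = (s.drop idx).count c + (gUnm s t idx).count c := by
  intro t
  induction t with
  | nil =>
    intro idx h c
    simp only [subIdx] at h
    subst h
    simp [gUnm]
  | cons ch rest ih =>
    intro idx h c
    simp only [subIdx] at h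
    simp only [gUnm]
    split
    · rename_i hm
      obtain ⟨hlt, hget⟩ := hm
      rw [if_pos ⟨hlt, hget⟩] at h
      have hdrop : s.drop idx = ch :: s.drop (idx + 1) := by
        rw [List.drop_eq_getElem_cons hlt]
        congr 1
        have : s[idx] = ch := by
          have := hget
          rw [List.getElem?_eq_getElem hlt] at this
          exact Option.some.inj this
        rw [this]
      rw [hdrop]
      simp only [List.count_cons, ih _ h c]
      split <;> omega
    · rename_i hm
      rw [if_neg hm] at h
      simp only [List.count_cons, ih _ h c]
      split <;> omega

theorem check_eq_alt (s t p : String) : check s t p = check_alt s t p := by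
  unfold check check_alt
  rw [loopA_eq]
  by_cases hfull : subIdx s.toList t.toList 0 = s.toList.length
  · have hnl : ¬ subIdx s.toList t.toList 0 < s.toList.length := by omega
    rw [if_neg hnl, hfull]
    simp only [beq_self_eq_true, Bool.true_and]
    have hc := count_split s.toList t.toList 0 hfull
    simp only [List.drop_zero] at hc
    rw [Bool.eq_iff_iff]
    simp only [List.all_eq_true, decide_eq_true_eq, PySem.Dict.getD_counter, PySem.Set.mem_ofList]
    constructor
    · intro h c hct
      have hcc := hc c
      by_cases hmem : c ∈ gUnm s.toList t.toList 0
      · have := h c hmem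
        omega
      · rw [List.count_eq_zero_of_not_mem hmem] at hcc
        omega
    · intro h c hmem
      have hct : c ∈ t.toList := by
        have hcc := hc c
        have : 0 < (gUnm s.toList t.toList 0).count c := List.count_pos_iff.mpr hmem
        have : 0 < t.toList.count c := by omega
        exact List.count_pos_iff.mp this
      have := h c hct
      have hcc := hc c
      omega
  · have hlt : subIdx s.toList t.toList 0 < s.toList.length := by
      have := subIdx_le s.toList t.toList 0 (by omega)
      omega
    rw [if_pos hlt]
    simp only [Bool.and_eq_false_iff]
    left
    simp only [beq_eq_false_iff_ne, ne_eq]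
    omega

-- ===== VERDICT (by name: the statement is the Claim_ definition above) =====
theorem check_spec : Claim_equal_check := by
  intro s t p _
  unfold Spec_check
  exact check_eq_alt s t p
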